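-- pv_equiv track=rewrite | github.com/MC-and-his-Agents/Syvert | syvert/platform_leakage.py | _resolve_key_signal
-- ===== SOURCE A (Python) =====
-- from collections.abc import Iterable, Mapping, Sequence
--
-- def _resolve_key_signal(
--     events: Sequence[tuple[tuple[int, int], tuple[frozenset[str], bool], bool]],
--     position: tuple[int, int],
-- ) -> tuple[frozenset[str], bool]:
--     active_literals: frozenset[str] = frozenset()
--     active_dynamic = False
--     for event_position, value, branch_local in events:
--         if event_position >= position:
--             break
--         literals, dynamic = value
--         if branch_local:
--             active_literals = active_literals.union(literals)
--             active_dynamic = active_dynamic or dynamic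
--             continue
--         active_literals = literals
--         active_dynamic = dynamic
--     return (active_literals, active_dynamic)
-- ===== SOURCE B (Python) =====
-- def _resolve_key_signal(events, position):
--     # Two-phase: build the prefix before the cutoff, then resolve from the
--     # last reset (non-branch-local) event forward.
--     prefix = []
--     for event in events:
--         if event[0] >= position:
--             break
--         prefix.append(event)
--     base_literals, base_dynamic = frozenset(), False
--     tail = []  # branch-local events after the last reset, in forward order
--     for event in reversed(prefix):
--         _, value, branch_local = event
--         if branch_local:
--             tail.insert(0, event)
--         else:
--             base_literals, base_dynamic = value
--             break
--     for _, (literals, dynamic), _ in tail: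
--         base_literals = base_literals.union(literals)
--         base_dynamic = base_dynamic or dynamic
--     return (base_literals, base_dynamic)
-- ===== Notes on version B (the rewrite author's own statement) =====
-- stated objective: alternative
-- what changed: Replaces A's single stateful fold (which overwrites its accumulator at every reset event) by a two-phase resolution: build the prefix before the cutoff, scan it backwards to find the last reset event and the branch-local tail after it, then fold union/or forward over just that tail.
import Mathlib
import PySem

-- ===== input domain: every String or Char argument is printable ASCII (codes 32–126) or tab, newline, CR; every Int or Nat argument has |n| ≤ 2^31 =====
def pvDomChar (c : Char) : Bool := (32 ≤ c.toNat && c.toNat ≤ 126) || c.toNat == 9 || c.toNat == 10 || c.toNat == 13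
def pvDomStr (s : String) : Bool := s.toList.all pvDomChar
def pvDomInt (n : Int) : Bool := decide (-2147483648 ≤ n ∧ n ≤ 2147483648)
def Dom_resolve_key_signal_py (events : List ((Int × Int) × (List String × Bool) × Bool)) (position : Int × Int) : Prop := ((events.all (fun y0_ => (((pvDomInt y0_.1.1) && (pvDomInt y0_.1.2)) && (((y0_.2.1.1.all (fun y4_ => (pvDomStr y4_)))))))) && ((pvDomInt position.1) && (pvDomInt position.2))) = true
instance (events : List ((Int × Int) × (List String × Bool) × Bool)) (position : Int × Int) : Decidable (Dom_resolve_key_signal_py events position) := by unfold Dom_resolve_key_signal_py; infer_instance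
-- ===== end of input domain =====

-- B restructures A's single stateful fold into a two-phase resolution (cutoff prefix,
-- then resolve from the last reset event forward); alternative decomposition, same cost.

-- ===== PORT A =====
-- Python tuple comparison (a, b) >= (c, d): lexicographic
def pvPairGe (a b : Int × Int) : Bool := a.1 > b.1 || (a.1 == b.1 && a.2 ≥ b.2)

-- A's for-loop with break, threading (active_literals, active_dynamic)
def pvLoopA (events : List ((Int × Int) × (List String × Bool) × Bool)) (position : Int × Int)
    (al : List String) (ad : Bool) : List String × Bool :=
  match events with
  | [] => (al, ad)
  | (ep, (lits, dyn), bl) :: rest =>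
    if pvPairGe ep position then (al, ad)
    else if bl then pvLoopA rest position (PySem.Set.union al lits) (ad || dyn)
    else pvLoopA rest position lits dyn

def resolve_key_signal_py (events : List ((Int × Int) × (List String × Bool) × Bool)) (position : Int × Int) : List String × Bool :=
  pvLoopA events position [] false

-- ===== PORT B =====
-- phase 1: the prefix of events strictly before the cutoff (B's first loop with break)
def pvPrefixB (events : List ((Int × Int) × (List String × Bool) × Bool)) (position : Int × Int) :
    List ((Int × Int) × (List String × Bool) × Bool) :=
  match events with
  | [] => []
  | e :: rest => if pvPairGe e.1 position then [] else e :: pvPrefixB rest position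

-- phase 2: scan the reversed prefix; collect branch-local events (tail.insert(0, event))
-- until the first reset event, whose value becomes the base
def pvBackB (revPrefix : List ((Int × Int) × (List String × Bool) × Bool))
    (tail : List ((Int × Int) × (List String × Bool) × Bool)) :
    (List String × Bool) × List ((Int × Int) × (List String × Bool) × Bool) :=
  match revPrefix with
  | [] => (([], false), tail)
  | e :: rest => if e.2.2 then pvBackB rest (e :: tail) else (e.2.1, tail)

-- phase 3: fold union / or over the collected branch-local tail, starting from the base
def pvFoldTail (tail : List ((Int × Int) × (List String × Bool) × Bool))
    (bl : List String) (bd : Bool) : List String × Bool :=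
  match tail with
  | [] => (bl, bd)
  | (_, (l, d), _) :: rest => pvFoldTail rest (PySem.Set.union bl l) (bd || d)

def resolve_key_signal_py_alt (events : List ((Int × Int) × (List String × Bool) × Bool)) (position : Int × Int) : List String × Bool :=
  let pfx := pvPrefixB events position
  let r := pvBackB pfx.reverse []
  pvFoldTail r.2 r.1.1 r.1.2

-- ===== PRECONDITION & SPEC =====
def Spec_resolve_key_signal_py (events : List ((Int × Int) × (List String × Bool) × Bool)) (position : Int × Int) (out : List String × Bool) : Prop := out = resolve_key_signal_py_alt events position
instance (events : List ((Int × Int) × (List String × Bool) × Bool)) (position : Int × Int) (out : List String × Bool) : Decidable (Spec_resolve_key_signal_py events position out) := by unfold Spec_resolve_key_signal_py; infer_instance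

-- ===== CLAIM (what is proved, stated in full; the proofs are below) =====
def Claim_equal_resolve_key_signal_py : Prop := ∀ (events : List ((Int × Int) × (List String × Bool) × Bool)) (position : Int × Int), Dom_resolve_key_signal_py events position → Spec_resolve_key_signal_py events position (resolve_key_signal_py events position)

-- ===== LEMMAS AND PROOFS =====

-- A's fold restricted to the prefix (no cutoff test left)
def pvProc (p : List ((Int × Int) × (List String × Bool) × Bool))
    (al : List String) (ad : Bool) : List String × Bool :=
  match p with
  | [] => (al, ad)
  | (_, (l, d), bl) :: rest =>
    if bl then pvProc rest (PySem.Set.union al l) (ad || d) else pvProc rest l d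

theorem pvLoopA_eq_proc (events : List ((Int × Int) × (List String × Bool) × Bool))
    (position : Int × Int) (al : List String) (ad : Bool) :
    pvLoopA events position al ad = pvProc (pvPrefixB events position) al ad := by
  induction events generalizing al ad with
  | nil => rfl
  | cons e rest ih =>
    obtain ⟨ep, ⟨l, d⟩, bl⟩ := e
    simp only [pvLoopA, pvPrefixB]
    by_cases h : pvPairGe ep position = true
    · simp [h, pvProc]
    · simp [h, pvProc]
      by_cases hb : bl <;> simp [hb, ih]

theorem pvProc_snoc (p : List ((Int × Int) × (List String × Bool) × Bool))
    (e : (Int × Int) × (List String × Bool) × Bool) (al : List String) (ad : Bool) :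
    pvProc (p ++ [e]) al ad =
      if e.2.2 then (PySem.Set.union (pvProc p al ad).1 e.2.1.1, (pvProc p al ad).2 || e.2.1.2)
      else (e.2.1.1, e.2.1.2) := by
  induction p generalizing al ad with
  | nil => obtain ⟨ep, ⟨l, d⟩, bl⟩ := e; by_cases hb : bl <;> simp [pvProc, hb]
  | cons f rest ih =>
    obtain ⟨fp, ⟨fl, fd⟩, fb⟩ := f
    by_cases hb : fb <;> simp [pvProc, hb, ih]

theorem pvBackB_tail (xs tail : List ((Int × Int) × (List String × Bool) × Bool)) :
    pvBackB xs tail = ((pvBackB xs []).1, (pvBackB xs []).2 ++ tail) := by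
  induction xs generalizing tail with
  | nil => simp [pvBackB]
  | cons e rest ih =>
    by_cases hb : e.2.2 <;> simp [pvBackB, hb]
    rw [ih (e :: tail), ih [e]]
    simp

theorem pvFoldTail_snoc (t : List ((Int × Int) × (List String × Bool) × Bool))
    (e : (Int × Int) × (List String × Bool) × Bool) (bl : List String) (bd : Bool) :
    pvFoldTail (t ++ [e]) bl bd =
      (PySem.Set.union (pvFoldTail t bl bd).1 e.2.1.1, (pvFoldTail t bl bd).2 || e.2.1.2) := by
  induction t generalizing bl bd with
  | nil => obtain ⟨ep, ⟨l, d⟩, bb⟩ := e; simp [pvFoldTail]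
  | cons f rest ih =>
    obtain ⟨fp, ⟨fl, fd⟩, fb⟩ := f
    simp [pvFoldTail, ih]

theorem pvProc_eq_back (p : List ((Int × Int) × (List String × Bool) × Bool)) :
    pvProc p [] false =
      pvFoldTail (pvBackB p.reverse []).2 (pvBackB p.reverse []).1.1 (pvBackB p.reverse []).1.2 := by
  induction p using List.reverseRecOn with
  | nil => rfl
  | append_singleton p e ih =>
    rw [pvProc_snoc, List.reverse_append]
    simp only [List.reverse_cons, List.reverse_nil, List.nil_append, List.singleton_append]
    by_cases hb : e.2.2
    · rw [show pvBackB (e :: p.reverse) [] = pvBackB p.reverse [e] by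
        obtain ⟨ep, ⟨l, d⟩, bb⟩ := e; simp at hb; simp [pvBackB, hb]]
      rw [pvBackB_tail p.reverse [e]]
      simp only [hb, if_true]
      rw [pvFoldTail_snoc, ih]
    · rw [show pvBackB (e :: p.reverse) [] = (e.2.1, []) by
        obtain ⟨ep, ⟨l, d⟩, bb⟩ := e; simp at hb; simp [pvBackB, hb]]
      simp [hb, pvFoldTail]

-- ===== VERDICT (by name: the statement is the Claim_ definition above) =====
theorem resolve_key_signal_py_spec : Claim_equal_resolve_key_signal_py := by
  intro events position _
  unfold Spec_resolve_key_signal_py resolve_key_signal_py resolve_key_signal_py_alt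
  rw [pvLoopA_eq_proc, pvProc_eq_back]
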